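-- pv_equiv track=rewrite | github.com/star14ms/CUBE_simulation | Cube.py | split_cmd
-- ===== SOURCE A (Python) =====
-- def split_cmd(cmds):
--     cmds = cmds.replace('"',"'")
--     splited_cmds = []
--     cmd_start = None
--     for idx, cmd in enumerate(cmds):
--         if cmd in ['U','E','D','R','M','L','F','S','B','x','y','z','u','d','r','l','f','b']:
--             if cmd_start == None:
--                 cmd_start = idx
--             else:
--                 splited_cmds.append(cmds[cmd_start:idx])
--                 cmd_start = idx
--         elif cmd not in [' ',"'",'2']:
--             return [cmd, '?']
--
--     splited_cmds.append(cmds[cmd_start:])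
--
--     return splited_cmds
-- ===== SOURCE B (Python) =====
-- def split_cmd(cmds):
--     cmds = cmds.replace('"', "'")
--     moves = set('UEDRMLFSBxyzudrlfb')
--     for ch in cmds:
--         if ch not in moves and ch not in " '2":
--             return [ch, '?']
--     idxs = [i for i, ch in enumerate(cmds) if ch in moves]
--     if not idxs:
--         return [cmds]
--     return [cmds[a:b] for a, b in zip(idxs, idxs[1:])] + [cmds[idxs[-1]:]]
-- ===== Notes on version B (the rewrite author's own statement) =====
-- stated objective: alternative
-- what changed: A's single interleaved scan with a pending-start accumulator is replaced by a validate-first pass (first invalid char via early return), then collecting all move-character indices and slicing the string between consecutive indices with zip.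
import Mathlib
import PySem

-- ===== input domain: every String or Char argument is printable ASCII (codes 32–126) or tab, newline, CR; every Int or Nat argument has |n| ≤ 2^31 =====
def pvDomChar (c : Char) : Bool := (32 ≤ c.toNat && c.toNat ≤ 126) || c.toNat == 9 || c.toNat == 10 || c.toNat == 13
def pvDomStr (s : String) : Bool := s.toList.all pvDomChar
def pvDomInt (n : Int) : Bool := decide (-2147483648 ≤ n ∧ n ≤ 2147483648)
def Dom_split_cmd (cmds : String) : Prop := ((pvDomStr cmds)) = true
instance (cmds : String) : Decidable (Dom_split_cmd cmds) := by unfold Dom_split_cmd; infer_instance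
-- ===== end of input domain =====

-- B replaces A's interleaved scan/append loop by a validate-first pass, then index
-- collection and slicing between consecutive move positions (objective: alternative).

-- ===== PORT A =====
def pvMoveChars : List Char :=
  ['U','E','D','R','M','L','F','S','B','x','y','z','u','d','r','l','f','b']

-- A's for-loop over enumerate(cmds) with state (splited_cmds, cmd_start) and early return
def splitA_loop (cs : List Char) : List (Int × Char) → List String → Option Int → List String
  | [], acc, start => acc ++ [String.ofList (PySem.List.slice cs start none)]
  | (i, c) :: rest, acc, start =>
    if c ∈ pvMoveChars then
      match start with
      | none => splitA_loop cs rest acc (some i)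
      | some s =>
        splitA_loop cs rest (acc ++ [String.ofList (PySem.List.slice cs (some s) (some i))]) (some i)
    else if c ∈ [' ', '\'', '2'] then
      splitA_loop cs rest acc start
    else
      [String.ofList [c], "?"]

def split_cmd (cmds : String) : List String :=
  let cs := (PySem.Str.replace cmds "\"" "'").toList
  splitA_loop cs (PySem.List.enumerate cs 0) [] none

-- ===== PORT B =====
def pvMoveSet : PySem.Set Char := PySem.Set.ofList "UEDRMLFSBxyzudrlfb".toList

-- Source B's first loop: early return of the first char that is neither a move nor in " '2"
def pvFirstInvalid (cs : List Char) : Option Char :=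
  cs.find? (fun c => !(PySem.Set.contains pvMoveSet c) && !(c ∈ [' ', '\'', '2']))

def split_cmd_alt (cmds : String) : List String :=
  let cs := (PySem.Str.replace cmds "\"" "'").toList
  match pvFirstInvalid cs with
  | some c => [String.ofList [c], "?"]
  | none =>
    let idxs :=
      ((PySem.List.enumerate cs 0).filter (fun p => PySem.Set.contains pvMoveSet p.2)).map (·.1)
    match idxs with
    | [] => [String.ofList cs]
    | i :: is =>
      ((i :: is).zip is).map
          (fun p => String.ofList (PySem.List.slice cs (some p.1) (some p.2)))
        ++ [String.ofList (PySem.List.slice cs (some ((i :: is).getLast (List.cons_ne_nil i is))) none)]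

-- ===== PRECONDITION & SPEC =====
def Spec_split_cmd (cmds : String) (out : List String) : Prop := out = split_cmd_alt cmds
instance (cmds : String) (out : List String) : Decidable (Spec_split_cmd cmds out) := by unfold Spec_split_cmd; infer_instance

-- ===== CLAIM (what is proved, stated in full; the proofs are below) =====
def Claim_equal_split_cmd : Prop := ∀ (cmds : String), Dom_split_cmd cmds → Spec_split_cmd cmds (split_cmd cmds)

-- ===== LEMMAS AND PROOFS =====

-- "invalid" test of both programs, on a single character
def pvBad (c : Char) : Bool := !decide (c ∈ pvMoveChars) && !decide (c ∈ [' ', '\'', '2'])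

-- tokens A's loop will still emit given the pending start and the remaining move indices
def pvTok (cs : List Char) : Option Int → List Int → List String
  | start, [] => [String.ofList (PySem.List.slice cs start none)]
  | none, i :: is => pvTok cs (some i) is
  | some s, i :: is => String.ofList (PySem.List.slice cs (some s) (some i)) :: pvTok cs (some i) is

theorem pvMoveSet_contains (c : Char) :
    PySem.Set.contains pvMoveSet c = decide (c ∈ pvMoveChars) := by
  simp [PySem.Set.contains, pvMoveSet, pvMoveChars]

theorem loopA_eq (cs : List Char) (es : List (Int × Char)) (acc : List String) (start : Option Int) :
    splitA_loop cs es acc start =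
      match es.find? (fun p => pvBad p.2) with
      | some p => [String.ofList [p.2], "?"]
      | none => acc ++ pvTok cs start ((es.filter (fun p => decide (p.2 ∈ pvMoveChars))).map (·.1)) := by
  induction es generalizing acc start with
  | nil => simp [splitA_loop, pvTok]
  | cons e rest ih =>
    obtain ⟨i, c⟩ := e
    by_cases hm : c ∈ pvMoveChars
    · have hb : pvBad c = false := by simp [pvBad, hm]
      cases start with
      | none => simp [splitA_loop, hm, hb, ih, pvTok]
      | some s => simp [splitA_loop, hm, hb, ih, pvTok]
    · by_cases hs : c ∈ [' ', '\'', '2']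
      · have hb : pvBad c = false := by simp [pvBad, hs]
        simp [splitA_loop, hm, hs, ih, hb]
      · have hb : pvBad c = true := by simp [pvBad, hm, hs]
        simp [splitA_loop, hm, hs, hb]

theorem tok_some_eq (cs : List Char) (a : Int) (is : List Int) :
    pvTok cs (some a) is =
      ((a :: is).zip is).map (fun p => String.ofList (PySem.List.slice cs (some p.1) (some p.2)))
        ++ [String.ofList (PySem.List.slice cs (some ((a :: is).getLast (List.cons_ne_nil a is))) none)] := by
  induction is generalizing a with
  | nil => simp [pvTok]
  | cons b is' ih => simp [pvTok, ih, List.getLast]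

theorem find?_enumerate (cs : List Char) (s : Int) (q : Char → Bool) :
    ((PySem.List.enumerate cs s).find? (fun p => q p.2)).map (·.2) = cs.find? q := by
  induction cs generalizing s with
  | nil => simp [PySem.List.enumerate_nil]
  | cons c rest ih =>
    by_cases h : q c = true
    · simp [PySem.List.enumerate_cons, h]
    · simp only [Bool.not_eq_true] at h
      simp [PySem.List.enumerate_cons, h, ih]

-- ===== VERDICT (by name: the statement is the Claim_ definition above) =====

theorem split_cmd_spec : Claim_equal_split_cmd := by
  intro cmds _
  unfold Spec_split_cmd split_cmd split_cmd_alt pvFirstInvalid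
  have hfun : (fun c => !(PySem.Set.contains pvMoveSet c) && !(c ∈ [' ', '\'', '2'])) = pvBad := by
    funext c; rw [pvMoveSet_contains]; simp [pvBad]
  have hfil : (fun p : Int × Char => PySem.Set.contains pvMoveSet p.2)
      = (fun p : Int × Char => decide (p.2 ∈ pvMoveChars)) := by
    funext p; exact pvMoveSet_contains p.2
  rw [loopA_eq, hfun, hfil]
  set cs := (PySem.Str.replace cmds "\"" "'").toList with hcs
  have hfind := find?_enumerate cs 0 pvBad
  cases h : cs.find? pvBad with
  | some c =>
    rw [h] at hfind
    obtain ⟨p, hp, hpc⟩ := Option.map_eq_some_iff.mp hfind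
    simp [hp, hpc, h]
  | none =>
    rw [h] at hfind
    have hnone : (PySem.List.enumerate cs 0).find? (fun p => pvBad p.2) = none := by
      cases he : (PySem.List.enumerate cs 0).find? (fun p => pvBad p.2) with
      | none => rfl
      | some p => rw [he] at hfind; simp at hfind
    rw [hnone]
    simp only
    cases hi : ((PySem.List.enumerate cs 0).filter (fun p => decide (p.2 ∈ pvMoveChars))).map (·.1) with
    | nil => simp [pvTok, PySem.List.slice_none_none, h]
    | cons i is => simp [pvTok, tok_some_eq, h]
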